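-- pv_equiv track=rewrite | github.com/tomereiss/Pyramid-Game | tests.py | pyramid_indices
-- ===== SOURCE A (Python) =====
-- def pyramid_indices(row_value, col_value):
--     y = 4
--     z = 4
--     for x in range(5):
--         if (row_value == x) and (col_value > y or col_value < z):
--             return False
--         y = y + 1
--         z = z - 1
--     return True
-- ===== SOURCE B (Python) =====
-- def pyramid_indices(row_value, col_value):
--     # closed-form test instead of the 5-iteration loop
--     if row_value in (0, 1, 2, 3, 4) and (col_value > 4 + row_value or col_value < 4 - row_value):
--         return False
--     return True
-- ===== Notes on version B (the rewrite author's own statement) =====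
-- stated objective: simpler
-- what changed: Replaced the 5-iteration loop with mutating y/z bounds by a direct closed-form membership-and-bounds test.
import Mathlib
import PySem

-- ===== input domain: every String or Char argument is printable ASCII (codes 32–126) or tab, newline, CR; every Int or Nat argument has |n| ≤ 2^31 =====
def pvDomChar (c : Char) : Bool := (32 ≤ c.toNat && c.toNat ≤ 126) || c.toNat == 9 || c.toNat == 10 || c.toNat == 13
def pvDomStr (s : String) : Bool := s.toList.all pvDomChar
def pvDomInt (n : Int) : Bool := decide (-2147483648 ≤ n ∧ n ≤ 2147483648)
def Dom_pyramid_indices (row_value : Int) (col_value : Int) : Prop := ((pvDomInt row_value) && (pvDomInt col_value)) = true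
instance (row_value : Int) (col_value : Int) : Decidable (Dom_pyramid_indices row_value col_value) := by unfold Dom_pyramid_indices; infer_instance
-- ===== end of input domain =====

-- ===== PORT A =====
-- B replaces A's 5-iteration loop by a closed-form membership-and-bounds test (objective: simpler).
def pyramid_loop : List Int → Int → Int → Int → Int → Bool
  | [], _, _, _, _ => true
  | x :: xs, row_value, col_value, y, z =>
    if row_value == x && (col_value > y || col_value < z) then false
    else pyramid_loop xs row_value col_value (y + 1) (z - 1)

def pyramid_indices (row_value : Int) (col_value : Int) : Bool :=
  pyramid_loop (PySem.List.pyRange 0 5 1) row_value col_value 4 4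

-- ===== PORT B =====
def pyramid_indices_alt (row_value : Int) (col_value : Int) : Bool :=
  if ([0, 1, 2, 3, 4] : List Int).contains row_value
      && (col_value > 4 + row_value || col_value < 4 - row_value) then false
  else true

-- ===== PRECONDITION & SPEC =====
def Spec_pyramid_indices (row_value : Int) (col_value : Int) (out : Bool) : Prop := out = pyramid_indices_alt row_value col_value
instance (row_value : Int) (col_value : Int) (out : Bool) : Decidable (Spec_pyramid_indices row_value col_value out) := by unfold Spec_pyramid_indices; infer_instance

-- ===== CLAIM (what is proved, stated in full; the proofs are below) =====
def Claim_equal_pyramid_indices : Prop := ∀ (row_value : Int) (col_value : Int), Dom_pyramid_indices row_value col_value → Spec_pyramid_indices row_value col_value (pyramid_indices row_value col_value)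

-- ===== LEMMAS AND PROOFS =====

-- ===== VERDICT (by name: the statement is the Claim_ definition above) =====
theorem pyramid_indices_spec : Claim_equal_pyramid_indices := by
  intro r c _
  unfold Spec_pyramid_indices
  show pyramid_loop (PySem.List.pyRange 0 5 1) r c 4 4 = pyramid_indices_alt r c
  have hrange : PySem.List.pyRange 0 5 1 = [0, 1, 2, 3, 4] := by decide
  rw [hrange]
  simp only [pyramid_loop, pyramid_indices_alt, List.contains_eq_mem, List.mem_cons,
    List.not_mem_nil, decide_eq_true_eq]
  split_ifs <;> simp_all <;> omega
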